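-- pv_equiv track=rewrite | github.com/tevpg/fakedata_terminal | runtime_support.py | colour_band_specs
-- ===== SOURCE A (Python) =====
-- COLOUR_NORMAL_BRIGHTNESS_ORDER = [
--     "white",
--     "yellow",
--     "cyan",
--     "orange",
--     "green",
--     "magenta",
--     "red",
--     "purple",
--     "blue",
-- ]
--
-- def colour_band_specs(band: str) -> list[str]:
--     if band == "dim":
--         return [f"dim-{base}" for base in COLOUR_NORMAL_BRIGHTNESS_ORDER]
--     if band == "bright":
--         return [f"bright-{base}" for base in COLOUR_NORMAL_BRIGHTNESS_ORDER]
--     if band == "all":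
--         return (
--             [f"bright-{base}" for base in COLOUR_NORMAL_BRIGHTNESS_ORDER]
--             + COLOUR_NORMAL_BRIGHTNESS_ORDER[:]
--             + [f"dim-{base}" for base in COLOUR_NORMAL_BRIGHTNESS_ORDER]
--         )
--     return COLOUR_NORMAL_BRIGHTNESS_ORDER[:]
-- ===== SOURCE B (Python) =====
-- COLOUR_NORMAL_BRIGHTNESS_ORDER = [
--     "white",
--     "yellow",
--     "cyan",
--     "orange",
--     "green",
--     "magenta",
--     "red",
--     "purple",
--     "blue",
-- ]
--
-- # Master table of every spec, built once: bright block, bare block, dim block.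
-- _ALL_SPECS = []
-- for _prefix in ("bright-", "", "dim-"):
--     for _base in COLOUR_NORMAL_BRIGHTNESS_ORDER:
--         _ALL_SPECS.append(_prefix + _base)
--
-- def colour_band_specs(band: str) -> list[str]:
--     n = len(COLOUR_NORMAL_BRIGHTNESS_ORDER)
--     bounds = {"bright": (0, n), "all": (0, 3 * n), "dim": (2 * n, 3 * n)}
--     start, stop = bounds.get(band, (n, 2 * n))
--     return _ALL_SPECS[start:stop]
-- ===== Notes on version B (the rewrite author's own statement) =====
-- stated objective: alternative
-- what changed: B precomputes one master table of all 27 specs (bright block, bare block, dim block) with a nested loop done once, and the function itself only looks up slice bounds per band and returns a slice of that table, instead of A's branch-and-build comprehensions per call.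
import Mathlib
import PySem

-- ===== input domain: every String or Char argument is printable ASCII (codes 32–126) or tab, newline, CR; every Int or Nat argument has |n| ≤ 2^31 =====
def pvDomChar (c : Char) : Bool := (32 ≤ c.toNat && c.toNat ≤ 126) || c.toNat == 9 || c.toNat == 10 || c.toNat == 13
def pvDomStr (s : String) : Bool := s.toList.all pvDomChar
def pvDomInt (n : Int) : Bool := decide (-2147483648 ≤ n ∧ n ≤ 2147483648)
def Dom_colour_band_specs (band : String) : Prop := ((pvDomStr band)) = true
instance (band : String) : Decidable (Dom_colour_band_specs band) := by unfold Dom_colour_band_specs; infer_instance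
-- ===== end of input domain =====

-- B precomputes one master table of all specs and returns a per-band slice of it (objective: alternative).

def COLOUR_NORMAL_BRIGHTNESS_ORDER : List String :=
  ["white", "yellow", "cyan", "orange", "green", "magenta", "red", "purple", "blue"]

-- ===== PORT A =====
def colour_band_specs (band : String) : List String :=
  if band == "dim" then
    COLOUR_NORMAL_BRIGHTNESS_ORDER.map (fun base => "dim-" ++ base)
  else if band == "bright" then
    COLOUR_NORMAL_BRIGHTNESS_ORDER.map (fun base => "bright-" ++ base)
  else if band == "all" then
    COLOUR_NORMAL_BRIGHTNESS_ORDER.map (fun base => "bright-" ++ base)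
      ++ COLOUR_NORMAL_BRIGHTNESS_ORDER
      ++ COLOUR_NORMAL_BRIGHTNESS_ORDER.map (fun base => "dim-" ++ base)
  else COLOUR_NORMAL_BRIGHTNESS_ORDER

-- ===== PORT B =====
-- module-level nested append loop of Source B, as a fold
def ALL_SPECS : List String :=
  ["bright-", "", "dim-"].foldl
    (fun acc p => COLOUR_NORMAL_BRIGHTNESS_ORDER.foldl (fun acc2 base => acc2 ++ [p ++ base]) acc)
    []

def colour_band_specs_alt (band : String) : List String :=
  let n : Int := (COLOUR_NORMAL_BRIGHTNESS_ORDER.length : Int)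
  let bounds : PySem.Dict String (Int × Int) :=
    PySem.Dict.ofList [("bright", (0, n)), ("all", (0, 3 * n)), ("dim", (2 * n, 3 * n))]
  let se := PySem.Dict.getD bounds band (n, 2 * n)
  PySem.List.slice ALL_SPECS se.1 se.2

-- ===== PRECONDITION & SPEC =====
def Spec_colour_band_specs (band : String) (out : List String) : Prop := out = colour_band_specs_alt band
instance (band : String) (out : List String) : Decidable (Spec_colour_band_specs band out) := by unfold Spec_colour_band_specs; infer_instance

-- ===== CLAIM =====
def Claim_equal_colour_band_specs : Prop := ∀ (band : String), Dom_colour_band_specs band → Spec_colour_band_specs band (colour_band_specs band)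

-- ===== LEMMAS AND PROOFS =====

-- ===== VERDICT =====
theorem colour_band_specs_spec : Claim_equal_colour_band_specs := by
  intro band _
  unfold Spec_colour_band_specs colour_band_specs colour_band_specs_alt
  by_cases h1 : band = "dim"
  · subst h1; decide
  · by_cases h2 : band = "bright"
    · subst h2; decide
    · by_cases h3 : band = "all"
      · subst h3; decide
      · simp only [beq_iff_eq, if_neg h1, if_neg h2, if_neg h3]
        simp [PySem.Dict.ofList, PySem.Dict.update, PySem.Dict.getD_insert,
              PySem.Dict.getD_empty, h1, h2, h3]
        decide
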